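-- pv_equiv track=rewrite | github.com/pwl45/ordered-trees | luka/balanced_permutations.py | ref_suf_sum
-- ===== SOURCE A (Python) =====
-- def ref_suf_sum(ms):
--     i=len(ms)-1
--     total=0
--     while i>=0:
--         if i == len(ms)-1:
--             total += ms[i]
--         else:
--             if ms[i] < ms[i+1]:
--                 return total
--             else:
--                 total += ms[i]
--         i -= 1
--     return total
-- ===== SOURCE B (Python) =====
-- def ref_suf_sum(ms):
--     start = 0
--     for i in range(len(ms) - 1):
--         if ms[i] < ms[i + 1]:
--             start = i + 1
--     return sum(ms[start:])
-- ===== Notes on version B (the rewrite author's own statement) =====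
-- stated objective: alternative
-- what changed: A walks backward from the end accumulating a sum with an early return at the first ascent; B makes one forward pass recording the index after the last ascent and then sums the slice from there.
import Mathlib
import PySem

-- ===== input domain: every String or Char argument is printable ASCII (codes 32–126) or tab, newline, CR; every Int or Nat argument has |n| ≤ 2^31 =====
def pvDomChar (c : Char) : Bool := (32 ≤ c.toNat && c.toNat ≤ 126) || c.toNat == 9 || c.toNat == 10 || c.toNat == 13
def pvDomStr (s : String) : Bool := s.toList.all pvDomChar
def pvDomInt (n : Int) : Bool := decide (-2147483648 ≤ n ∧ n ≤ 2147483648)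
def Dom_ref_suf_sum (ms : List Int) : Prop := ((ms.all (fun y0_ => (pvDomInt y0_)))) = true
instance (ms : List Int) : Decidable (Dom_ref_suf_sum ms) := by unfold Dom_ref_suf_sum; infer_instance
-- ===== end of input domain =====

-- B replaces A's backward accumulate-with-early-return by a forward last-ascent scan plus a suffix-slice sum (alternative decomposition, same cost).

-- ===== PORT A =====
-- A's while-loop, counting i = j-1 down from len(ms)-1; indices are always in range so getD is exact.
def refSufLoopA (ms : List Int) : Nat → Int → Int
  | 0, total => total
  | j + 1, total =>
    if j = ms.length - 1 then refSufLoopA ms j (total + ms.getD j 0)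
    else if ms.getD j 0 < ms.getD (j + 1) 0 then total
    else refSufLoopA ms j (total + ms.getD j 0)

def ref_suf_sum (ms : List Int) : Int := refSufLoopA ms ms.length 0

-- ===== PORT B =====
-- B's forward pass: 'if ms[i] < ms[i+1]: start = i+1'
def refSufStepB (ms : List Int) (s : Nat) (i : Nat) : Nat :=
  if ms.getD i 0 < ms.getD (i + 1) 0 then i + 1 else s

def ref_suf_sum_alt (ms : List Int) : Int :=
  let start := (List.range (ms.length - 1)).foldl (refSufStepB ms) 0
  (ms.drop start).sum

-- ===== PRECONDITION & SPEC =====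
def Spec_ref_suf_sum (ms : List Int) (out : Int) : Prop := out = ref_suf_sum_alt ms
instance (ms : List Int) (out : Int) : Decidable (Spec_ref_suf_sum ms out) := by unfold Spec_ref_suf_sum; infer_instance

-- ===== CLAIM (what is proved, stated in full; the proofs are below) =====
def Claim_equal_ref_suf_sum : Prop := ∀ (ms : List Int), Dom_ref_suf_sum ms → Spec_ref_suf_sum ms (ref_suf_sum ms)

-- ===== LEMMAS AND PROOFS =====

def refSufStart (ms : List Int) (j : Nat) : Nat := (List.range j).foldl (refSufStepB ms) 0

theorem refSufStart_succ (ms : List Int) (j : Nat) :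
    refSufStart ms (j + 1) =
      if ms.getD j 0 < ms.getD (j + 1) 0 then j + 1 else refSufStart ms j := by
  simp [refSufStart, List.range_succ, refSufStepB]

theorem refSufStart_le (ms : List Int) (j : Nat) : refSufStart ms j ≤ j := by
  induction j with
  | zero => simp [refSufStart]
  | succ j ih =>
    rw [refSufStart_succ]
    split <;> omega

theorem seg_succ (ms : List Int) (j s : Nat) (hs : s ≤ j) (hj : j < ms.length) :
    ((ms.take (j + 1)).drop s).sum = ((ms.take j).drop s).sum + ms.getD j 0 := by
  rw [List.take_succ]
  have hlen : s ≤ (ms.take j).length := by simp; omega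
  rw [List.drop_append_of_le_length hlen, List.sum_append]
  have : ms[j]? = some ms[j] := List.getElem?_eq_getElem hj
  simp [this, List.getD]

theorem loopA_eq (ms : List Int) (j : Nat) (hj : j ≤ ms.length - 1) (t : Int) :
    refSufLoopA ms j t = t + ((ms.take j).drop (refSufStart ms j)).sum := by
  induction j generalizing t with
  | zero => simp [refSufLoopA, refSufStart]
  | succ j ih =>
    have hne : j ≠ ms.length - 1 := by omega
    have hjlt : j < ms.length := by omega
    rw [refSufLoopA, if_neg hne, refSufStart_succ]
    by_cases h : ms.getD j 0 < ms.getD (j + 1) 0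
    · rw [if_pos h, if_pos h]
      simp
    · rw [if_neg h, if_neg h, ih (by omega)]
      rw [seg_succ ms j _ (refSufStart_le ms j) hjlt]
      ring

theorem ref_suf_sum_eq (ms : List Int) : ref_suf_sum ms = ref_suf_sum_alt ms := by
  cases hm : ms.length with
  | zero =>
    have : ms = [] := List.eq_nil_of_length_eq_zero hm
    subst this
    rfl
  | succ m =>
    have hmlt : m < ms.length := by omega
    have h1 : ref_suf_sum ms = refSufLoopA ms (m + 1) 0 := by
      unfold ref_suf_sum; rw [hm]
    have h2 : refSufLoopA ms (m + 1) 0 = refSufLoopA ms m (0 + ms.getD m 0) := by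
      rw [refSufLoopA, if_pos (by omega)]
    set s := refSufStart ms m with hs
    have hsle : s ≤ m := refSufStart_le ms m
    have h3 : refSufLoopA ms m (0 + ms.getD m 0) =
        0 + ms.getD m 0 + ((ms.take m).drop s).sum := loopA_eq ms m (by omega) _
    -- B's side
    have halt : ref_suf_sum_alt ms = (ms.drop s).sum := by
      unfold ref_suf_sum_alt
      rw [hm]
      rfl
    have hsplit : ms.drop s = (ms.take m).drop s ++ ms.drop m := by
      conv_lhs => rw [← List.take_append_drop m ms]
      rw [List.drop_append_of_le_length (by simp; omega)]
    have hdropm : (ms.drop m).sum = ms.getD m 0 := by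
      have : ms.drop m = [ms[m]] := by
        apply List.ext_getElem
        · simp; omega
        · intro i h1 h2
          simp at h2
          subst h2
          simp
      rw [this]
      simp [List.getD, List.getElem?_eq_getElem hmlt]
    rw [h1, h2, h3, halt, hsplit, List.sum_append, hdropm]
    ring

-- ===== VERDICT (by name: the statement is the Claim_ definition above) =====
theorem ref_suf_sum_spec : Claim_equal_ref_suf_sum := by
  intro ms _
  unfold Spec_ref_suf_sum
  exact ref_suf_sum_eq ms
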